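-- pv_equiv track=rewrite | github.com/HamMC-sud/fitness-backend | api/program/program.py | _aggregate_sets_metrics
-- ===== SOURCE A (Python) =====
-- from typing import Optional, Any
--
-- def _aggregate_sets_metrics(sets_payload: list[dict[str, Any]]) -> dict[str, int]:
--     total_sets = len(sets_payload)
--     total_intervals = 0
--     total_reps_target = 0
--     timed_intervals = 0
--     timed_intervals_seconds = 0
--
--     for s in sets_payload:
--         reps = s.get("reps", []) or []
--         total_intervals += len(reps)
--         for rep in reps:
--             target = rep.get("target")
--             duration_seconds = rep.get("duration_seconds")
--
--             if target is not None:
--                 total_reps_target += int(target)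
--             if duration_seconds is not None:
--                 timed_intervals += 1
--                 timed_intervals_seconds += int(duration_seconds)
--
--     return {
--         "total_sets": total_sets,
--         "total_intervals": total_intervals,
--         "total_reps_target": total_reps_target,
--         "timed_intervals": timed_intervals,
--         "timed_intervals_seconds": timed_intervals_seconds,
--     }
-- ===== SOURCE B (Python) =====
-- from typing import Optional, Any
--
-- def _aggregate_sets_metrics(sets_payload: list[dict[str, Any]]) -> dict[str, int]:
--     all_reps = [rep for s in sets_payload for rep in (s.get("reps") or [])]
--     targets = [int(rep["target"]) for rep in all_reps if rep.get("target") is not None]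
--     durations = [int(rep["duration_seconds"]) for rep in all_reps
--                  if rep.get("duration_seconds") is not None]
--     return {
--         "total_sets": len(sets_payload),
--         "total_intervals": len(all_reps),
--         "total_reps_target": sum(targets),
--         "timed_intervals": len(durations),
--         "timed_intervals_seconds": sum(durations),
--     }
-- ===== Notes on version B (the rewrite author's own statement) =====
-- stated objective: alternative
-- what changed: Replaces the single fused nested loop carrying four running counters with a multi-pass decomposition: flatten all reps once, then compute each metric independently (lengths and sums of filtered comprehensions).
import Mathlib
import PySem

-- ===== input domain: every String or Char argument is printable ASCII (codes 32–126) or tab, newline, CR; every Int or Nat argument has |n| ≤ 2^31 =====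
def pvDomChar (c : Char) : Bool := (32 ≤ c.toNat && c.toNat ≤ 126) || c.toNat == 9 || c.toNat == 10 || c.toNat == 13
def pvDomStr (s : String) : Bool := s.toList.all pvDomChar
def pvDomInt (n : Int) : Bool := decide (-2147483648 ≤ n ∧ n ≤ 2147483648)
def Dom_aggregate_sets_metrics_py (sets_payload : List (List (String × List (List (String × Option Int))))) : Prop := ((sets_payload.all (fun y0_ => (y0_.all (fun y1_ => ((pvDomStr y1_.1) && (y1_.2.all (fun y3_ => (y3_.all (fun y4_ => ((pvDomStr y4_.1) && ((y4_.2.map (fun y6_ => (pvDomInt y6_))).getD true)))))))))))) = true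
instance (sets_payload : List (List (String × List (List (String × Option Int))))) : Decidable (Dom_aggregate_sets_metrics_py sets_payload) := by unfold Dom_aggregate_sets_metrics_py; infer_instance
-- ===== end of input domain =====

-- B changes the decomposition only: one flattening pass then independent per-metric passes; same values.
-- ===== PORT A =====
-- first-match dict lookup (Python dict.get); inputs are assoc lists under the type convention
def pvGet? {V : Type} (s : List (String × V)) (k : String) : Option V :=
  (PySem.Dict.mk s).get? k

def aggregate_sets_metrics_py (sets_payload : List (List (String × List (List (String × Option Int))))) : List (String × Int) :=
  let total_sets : Int := sets_payload.length
  -- state = (total_intervals, total_reps_target, timed_intervals, timed_intervals_seconds)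
  let st :=
    sets_payload.foldl (fun (acc : Int × Int × Int × Int) s =>
      let r := (pvGet? s "reps").getD []        -- s.get("reps", [])
      let reps := if r.isEmpty then [] else r   -- … or []
      let acc := (acc.1 + reps.length, acc.2.1, acc.2.2.1, acc.2.2.2)
      reps.foldl (fun (acc : Int × Int × Int × Int) rep =>
        let target := (pvGet? rep "target").join              -- rep.get("target") : missing or stored None ⇒ none
        let duration_seconds := (pvGet? rep "duration_seconds").join
        let acc := match target with
          | some t => (acc.1, acc.2.1 + t, acc.2.2.1, acc.2.2.2)   -- int(target) = target (values are ints)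
          | none => acc
        match duration_seconds with
          | some d => (acc.1, acc.2.1, acc.2.2.1 + 1, acc.2.2.2 + d)
          | none => acc) acc)
      (0, 0, 0, 0)
  [("total_sets", total_sets), ("total_intervals", st.1), ("total_reps_target", st.2.1),
   ("timed_intervals", st.2.2.1), ("timed_intervals_seconds", st.2.2.2)]

-- ===== PORT B =====
def aggregate_sets_metrics_py_alt (sets_payload : List (List (String × List (List (String × Option Int))))) : List (String × Int) :=
  let all_reps := sets_payload.flatMap (fun s => (pvGet? s "reps").getD [])  -- s.get("reps") or []
  let targets := all_reps.filterMap (fun rep => (pvGet? rep "target").join)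
  let durations := all_reps.filterMap (fun rep => (pvGet? rep "duration_seconds").join)
  [("total_sets", (sets_payload.length : Int)), ("total_intervals", (all_reps.length : Int)),
   ("total_reps_target", targets.sum), ("timed_intervals", (durations.length : Int)),
   ("timed_intervals_seconds", durations.sum)]

-- ===== PRECONDITION & SPEC =====
def Spec_aggregate_sets_metrics_py (sets_payload : List (List (String × List (List (String × Option Int))))) (out : List (String × Int)) : Prop := out = aggregate_sets_metrics_py_alt sets_payload
instance (sets_payload : List (List (String × List (List (String × Option Int))))) (out : List (String × Int)) : Decidable (Spec_aggregate_sets_metrics_py sets_payload out) := by unfold Spec_aggregate_sets_metrics_py; infer_instance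

-- ===== CLAIM (what is proved, stated in full; the proofs are below) =====
def Claim_equal_aggregate_sets_metrics_py : Prop := ∀ (sets_payload : List (List (String × List (List (String × Option Int))))), Dom_aggregate_sets_metrics_py sets_payload → Spec_aggregate_sets_metrics_py sets_payload (aggregate_sets_metrics_py sets_payload)

-- ===== LEMMAS AND PROOFS =====

-- ===== VERDICT (by name: the statement is the Claim_ definition above) =====
-- inner loop characterisation
theorem inner_fold (reps : List (List (String × Option Int))) (acc : Int × Int × Int × Int) :
    reps.foldl (fun (acc : Int × Int × Int × Int) rep =>
        let target := (pvGet? rep "target").join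
        let duration_seconds := (pvGet? rep "duration_seconds").join
        let acc := match target with
          | some t => (acc.1, acc.2.1 + t, acc.2.2.1, acc.2.2.2)
          | none => acc
        match duration_seconds with
          | some d => (acc.1, acc.2.1, acc.2.2.1 + 1, acc.2.2.2 + d)
          | none => acc) acc
      = (acc.1,
         acc.2.1 + (reps.filterMap (fun rep => (pvGet? rep "target").join)).sum,
         acc.2.2.1 + (reps.filterMap (fun rep => (pvGet? rep "duration_seconds").join)).length,
         acc.2.2.2 + (reps.filterMap (fun rep => (pvGet? rep "duration_seconds").join)).sum) := by
  induction reps generalizing acc with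
  | nil => simp
  | cons rep rest ih =>
    simp only [List.foldl_cons, List.filterMap_cons]
    cases h1 : (pvGet? rep "target").join <;> cases h2 : (pvGet? rep "duration_seconds").join <;>
      simp [ih] <;> omega

theorem outer_fold (sp : List (List (String × List (List (String × Option Int)))))
    (acc : Int × Int × Int × Int) :
    sp.foldl (fun (acc : Int × Int × Int × Int) s =>
      let r := (pvGet? s "reps").getD []
      let reps := if r.isEmpty then [] else r
      let acc := (acc.1 + reps.length, acc.2.1, acc.2.2.1, acc.2.2.2)
      reps.foldl (fun (acc : Int × Int × Int × Int) rep =>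
        let target := (pvGet? rep "target").join
        let duration_seconds := (pvGet? rep "duration_seconds").join
        let acc := match target with
          | some t => (acc.1, acc.2.1 + t, acc.2.2.1, acc.2.2.2)
          | none => acc
        match duration_seconds with
          | some d => (acc.1, acc.2.1, acc.2.2.1 + 1, acc.2.2.2 + d)
          | none => acc) acc) acc
      = (let ar := sp.flatMap (fun s => (pvGet? s "reps").getD [])
         (acc.1 + ar.length,
          acc.2.1 + (ar.filterMap (fun rep => (pvGet? rep "target").join)).sum,
          acc.2.2.1 + (ar.filterMap (fun rep => (pvGet? rep "duration_seconds").join)).length,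
          acc.2.2.2 + (ar.filterMap (fun rep => (pvGet? rep "duration_seconds").join)).sum)) := by
  induction sp generalizing acc with
  | nil => simp
  | cons s rest ih =>
    simp only [List.foldl_cons, List.flatMap_cons, List.filterMap_append, List.length_append,
      List.sum_append]
    rw [inner_fold, ih]
    have hr : (if ((pvGet? s "reps").getD []).isEmpty then ([] : List (List (String × Option Int)))
        else (pvGet? s "reps").getD []) = (pvGet? s "reps").getD [] := by
      split <;> simp_all [List.isEmpty_iff]
    simp only [hr]
    refine Prod.ext ?_ (Prod.ext ?_ (Prod.ext ?_ ?_)) <;> simp <;> omega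

theorem aggregate_sets_metrics_py_spec : Claim_equal_aggregate_sets_metrics_py := by
  intro sp _
  unfold Spec_aggregate_sets_metrics_py aggregate_sets_metrics_py aggregate_sets_metrics_py_alt
  rw [outer_fold]
  simp
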